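-- pv_equiv track=rewrite | github.com/daniel-reich/ubiquitous-fiesta | vfJujzoYBtgLC8frK_8.py | word_to_decimal
-- ===== SOURCE A (Python) =====
-- def word_to_decimal(word):
--     word = word.lower()
--     base = 10 + max([ord(c) - 96 for c in word])
--     ans = 0
--     power = 1
--     for c in word[::-1]:
--         ans += power * (ord(c) - 97 + 10)
--         power *= base
--     return ans
-- ===== SOURCE B (Python) =====
-- def word_to_decimal(word):
--     digits = [ord(c) - 87 for c in word.lower()]
--     base = 1 + max(digits)
--     ans = 0
--     for d in digits:
--         ans = ans * base + d
--     return ans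
-- ===== Notes on version B (the rewrite author's own statement) =====
-- stated objective: simpler
-- what changed: Materialises the digit list once (ord(c)-87), derives the base as 1+max(digits), and evaluates forward with Horner's rule (ans = ans*base + d) over the digits, eliminating A's word reversal, its separate running power accumulator, and its second per-character ord computation.
import Mathlib
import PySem

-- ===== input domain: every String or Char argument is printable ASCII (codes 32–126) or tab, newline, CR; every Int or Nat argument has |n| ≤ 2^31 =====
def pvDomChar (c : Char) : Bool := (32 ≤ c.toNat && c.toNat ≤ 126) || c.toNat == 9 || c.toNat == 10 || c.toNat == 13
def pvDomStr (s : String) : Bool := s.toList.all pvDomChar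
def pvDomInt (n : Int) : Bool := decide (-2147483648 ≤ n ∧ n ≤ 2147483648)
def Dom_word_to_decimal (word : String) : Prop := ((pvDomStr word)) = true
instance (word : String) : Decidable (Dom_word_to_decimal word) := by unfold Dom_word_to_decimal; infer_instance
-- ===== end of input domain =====

-- B materialises the digit list, derives the base as 1+max(digits), and evaluates with a
-- forward Horner loop, instead of A's reversed loop with a running power accumulator
-- (simpler decomposition, same cost).


-- ===== PORT A =====
-- word = word.lower(); base = 10 + max([ord(c)-96 for c in word]); reversed loop over (ans, power).
def word_to_decimal (word : String) : Int :=
  let w := (PySem.Str.lower word).toList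
  match PySem.List.max? (w.map (fun c => (c.toNat : Int) - 96)) (fun x => x) with
  | none => 0  -- Python raises ValueError here (empty word); excluded by Pre_
  | some m =>
    let base := 10 + m
    (w.reverse.foldl
      (fun (st : Int × Int) c => (st.1 + st.2 * ((c.toNat : Int) - 97 + 10), st.2 * base))
      (0, 1)).1

-- ===== PORT B =====
-- digits = [ord(c)-87 for c in word.lower()]; base = 1 + max(digits); forward Horner loop
def word_to_decimal_alt (word : String) : Int :=
  let digits := (PySem.Str.lower word).toList.map (fun c => (c.toNat : Int) - 87)
  match PySem.List.max? digits (fun x => x) with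
  | none => 0  -- Python raises ValueError here (empty word); excluded by Pre_
  | some m => digits.foldl (fun ans d => ans * (1 + m) + d) 0

-- ===== PRECONDITION & SPEC =====
-- Pre_ excludes only the empty string, on which A (and B) raise ValueError: max() of an empty sequence.
def Pre_word_to_decimal (word : String) : Prop := word ≠ ""
instance (word : String) : Decidable (Pre_word_to_decimal word) := by unfold Pre_word_to_decimal; infer_instance
def pvWitness_word_to_decimal : String := "ab"

def Spec_word_to_decimal (word : String) (out : Int) : Prop := out = word_to_decimal_alt word
instance (word : String) (out : Int) : Decidable (Spec_word_to_decimal word out) := by unfold Spec_word_to_decimal; infer_instance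

-- ===== CLAIM =====
def Claim_equal_word_to_decimal : Prop := ∀ (word : String), Dom_word_to_decimal word → Pre_word_to_decimal word → Spec_word_to_decimal word (word_to_decimal word)

-- ===== LEMMAS AND PROOFS =====

-- Horner fold with a general initial accumulator.
lemma horner_init (b : Int) (l : List Int) : ∀ a : Int,
    l.foldl (fun ans d => ans * b + d) a
      = a * b ^ l.length + l.foldl (fun ans d => ans * b + d) 0 := by
  induction l with
  | nil => intro a; simp
  | cons d t ih =>
    intro a
    simp only [List.foldl_cons, List.length_cons]
    rw [ih (a * b + d), ih (0 * b + d)]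
    ring

-- A's reversed (ans, power) loop equals init + power · Horner value of the digits.
lemma revfold_eq_horner (b : Int) (l : List Char) : ∀ a p : Int,
    l.reverse.foldl
        (fun (st : Int × Int) c => (st.1 + st.2 * ((c.toNat : Int) - 97 + 10), st.2 * b))
        (a, p)
      = (a + p * (l.map (fun c => (c.toNat : Int) - 87)).foldl (fun ans d => ans * b + d) 0,
         p * b ^ l.length) := by
  induction l with
  | nil => intro a p; simp
  | cons c t ih =>
    intro a p
    simp only [List.reverse_cons, List.foldl_append, List.foldl_cons, List.foldl_nil,
      List.map_cons, List.length_cons, ih a p]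
    rw [horner_init b (t.map (fun c => (c.toNat : Int) - 87)) (0 * b + ((c.toNat : Int) - 87))]
    simp only [List.length_map, Prod.mk.injEq]
    constructor <;> ring

-- Shifting every element by +9 shifts the running max by +9.
lemma foldl_max_add9 (t : List Int) : ∀ x : Int,
    (t.map (fun y => y + 9)).foldl max (x + 9) = t.foldl max x + 9 := by
  induction t with
  | nil => intro x; rfl
  | cons d r ih =>
    intro x
    simp only [List.map_cons, List.foldl_cons]
    rw [show max (x + 9) (d + 9) = max x d + 9 from max_add_add_right x d 9, ih]

-- ===== VERDICT =====
theorem word_to_decimal_spec : Claim_equal_word_to_decimal := by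
  intro word _ _
  unfold Spec_word_to_decimal word_to_decimal word_to_decimal_alt
  generalize (PySem.Str.lower word).toList = w
  dsimp only
  cases w with
  | nil => rfl
  | cons c t =>
    simp only [List.map_cons, PySem.List.max?_id_cons]
    have hmap : t.map (fun c => (c.toNat : Int) - 87)
        = (t.map (fun c => (c.toNat : Int) - 96)).map (fun y => y + 9) := by
      simp only [List.map_map]; apply List.map_congr_left; intro c _; simp; ring
    have hb : (1 : Int) + List.foldl max ((c.toNat : Int) - 87)
          (t.map (fun c => (c.toNat : Int) - 87))
        = 10 + List.foldl max ((c.toNat : Int) - 96)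
          (t.map (fun c => (c.toNat : Int) - 96)) := by
      rw [show ((c.toNat : Int) - 87) = ((c.toNat : Int) - 96) + 9 by ring, hmap,
        foldl_max_add9]
      ring
    rw [hb, revfold_eq_horner]
    simp
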